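-- pv_equiv track=rewrite | github.com/wopanda/feishu-agent-ops | skills/wechat-publisher/scripts/lib/image_generator.py | _insert_images_into_content
-- ===== SOURCE A (Python) =====
-- from typing import List, Dict, Any, Optional
--
-- def _insert_images_into_content(
--
--     content: str,
--     sections: List[Dict[str, Any]],
--     image_urls: List[Optional[str]],
-- ) -> str:
--     """将图片 URL 插入到文章内容中"""
--     if not sections or not any(image_urls):
--         return content
--
--     lines = content.split('\n')
--     section_index_map = {
--         section['line_index']: i for i, section in enumerate(sections)
--     }
--
--     new_lines = []
--
--     for line_index, line in enumerate(lines):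
--         new_lines.append(line)
--
--         # 检查是否是章节标题位置
--         if line_index in section_index_map:
--             idx = section_index_map[line_index]
--             url = image_urls[idx] if idx < len(image_urls) else None
--
--             if url:
--                 # 插入图片（HTML 格式，微信支持）
--                 image_html = f'<p><img src="{url}" style="width: 100%; max-width: 900px; display: block; margin: 20px auto;"/></p>'
--                 new_lines.append(image_html)
--
--     return '\n'.join(new_lines)
-- ===== SOURCE B (Python) =====
-- from typing import List, Dict, Any, Optional
--
--
-- def _insert_images_into_content(
--     content: str,
--     sections: List[Dict[str, Any]],
--     image_urls: List[Optional[str]],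
-- ) -> str:
--     """Splice image HTML into the content by applying pending insertions back to front."""
--     if not sections or not any(image_urls):
--         return content
--
--     lines = content.split('\n')
--     pos_map = {section['line_index']: i for i, section in enumerate(sections)}
--
--     insertions = []
--     for line_index, idx in pos_map.items():
--         if 0 <= line_index < len(lines) and idx < len(image_urls):
--             url = image_urls[idx]
--             if url:
--                 html = f'<p><img src="{url}" style="width: 100%; max-width: 900px; display: block; margin: 20px auto;"/></p>'
--                 insertions.append((line_index + 1, html))
--
--     out = list(lines)
--     for pos, html in sorted(insertions, key=lambda t: t[0], reverse=True):
--         out.insert(pos, html)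
--     return '\n'.join(out)
-- ===== Notes on version B (the rewrite author's own statement) =====
-- stated objective: alternative
-- what changed: Instead of streaming over every content line and appending image HTML after matched title lines, B builds a list of (position+1, html) splice points from the section map and applies them to a copy of the lines in descending position order with list.insert.
import Mathlib
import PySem

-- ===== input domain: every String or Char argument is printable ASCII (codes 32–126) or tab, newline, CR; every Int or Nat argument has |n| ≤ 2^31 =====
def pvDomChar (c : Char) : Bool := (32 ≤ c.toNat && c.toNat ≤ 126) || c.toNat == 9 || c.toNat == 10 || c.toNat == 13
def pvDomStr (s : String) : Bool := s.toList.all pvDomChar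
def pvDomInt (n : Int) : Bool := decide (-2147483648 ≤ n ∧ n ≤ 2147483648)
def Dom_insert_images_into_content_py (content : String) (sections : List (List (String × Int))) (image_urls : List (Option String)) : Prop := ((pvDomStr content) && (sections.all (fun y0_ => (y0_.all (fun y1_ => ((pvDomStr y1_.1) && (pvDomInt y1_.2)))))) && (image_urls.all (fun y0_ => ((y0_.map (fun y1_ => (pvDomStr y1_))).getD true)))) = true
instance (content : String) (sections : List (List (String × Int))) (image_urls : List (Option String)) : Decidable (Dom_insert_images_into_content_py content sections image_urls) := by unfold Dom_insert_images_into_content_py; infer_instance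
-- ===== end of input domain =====

-- B replaces A's per-line streaming loop by a pending-splice list: it collects (position+1, html)
-- insertions from the section map and applies them to a copy of the lines in descending position
-- order with list.insert (objective: alternative decomposition, same cost).

-- ===== PORT A =====

-- truthiness of an Optional[str] (None and "" are falsy)
def pvTruthy (o : Option String) : Bool :=
  match o with
  | some s => !(s == "")
  | none => false

-- the f-string building the image HTML
def pvHtml (u : String) : String :=
  PySem.Str.join "" ["<p><img src=\"", u, "\" style=\"width: 100%; max-width: 900px; display: block; margin: 20px auto;\"/></p>"]

-- section['line_index'] (first-match lookup in the association list)
def pvLookup (sec : List (String × Int)) : Option Int :=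
  (PySem.Dict.mk sec).get? "line_index"

-- {section['line_index']: i for i, section in enumerate(sections)} — shared comprehension of both programs
def pvSecMap (sections : List (List (String × Int))) : PySem.Dict Int Int :=
  (PySem.List.enumerate sections 0).foldl
    (fun d p => match pvLookup p.2 with
      | some li => d.insert li p.1
      | none => d)   -- unreachable inside Pre_ (Python raises KeyError there)
    PySem.Dict.empty

def insert_images_into_content_py (content : String) (sections : List (List (String × Int))) (image_urls : List (Option String)) : String :=
  if sections = [] ∨ image_urls.any pvTruthy = false then content
  else
    let lines := (PySem.Str.split? content "\n").getD []   -- sep ≠ "", so split? is always some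
    let m := pvSecMap sections
    let newLines := (PySem.List.enumerate lines 0).foldl
      (fun acc p =>
        let acc2 := acc ++ [p.2]
        match m.get? p.1 with
        | some idx =>
          let url : Option String :=
            if idx < (image_urls.length : Int) then (PySem.List.pyGet? image_urls idx).getD none else none
          match url with
          | some u => if u == "" then acc2 else acc2 ++ [pvHtml u]
          | none => acc2
        | none => acc2)
      []
    PySem.Str.join "\n" newLines

-- ===== PORT B =====

def insert_images_into_content_py_alt (content : String) (sections : List (List (String × Int))) (image_urls : List (Option String)) : String :=
  if sections = [] ∨ image_urls.any pvTruthy = false then content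
  else
    let lines := (PySem.Str.split? content "\n").getD []   -- sep ≠ "", so split? is always some
    let m := pvSecMap sections
    let insertions := m.items.foldl
      (fun acc q =>
        if 0 ≤ q.1 ∧ q.1 < (lines.length : Int) ∧ q.2 < (image_urls.length : Int) then
          match (PySem.List.pyGet? image_urls q.2).getD none with
          | some u => if u == "" then acc else acc ++ [(q.1 + 1, pvHtml u)]
          | none => acc
        else acc)
      ([] : List (Int × String))
    let out := (PySem.List.sorted insertions (fun q => q.1) true).foldl
      (fun ls q => PySem.List.insert ls q.1 q.2) lines
    PySem.Str.join "\n" out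

-- ===== PRECONDITION & SPEC =====
-- Pre_ excludes exactly the inputs where the Python raises KeyError: the early-return guard passes
-- and some section dict lacks the key 'line_index' (B raises identically there).
def Pre_insert_images_into_content_py (content : String) (sections : List (List (String × Int))) (image_urls : List (Option String)) : Prop :=
  (sections ≠ [] ∧ image_urls.any pvTruthy = true) →
    ∀ sec ∈ sections, (pvLookup sec).isSome = true

instance (content : String) (sections : List (List (String × Int))) (image_urls : List (Option String)) : Decidable (Pre_insert_images_into_content_py content sections image_urls) := by unfold Pre_insert_images_into_content_py; infer_instance

def pvWitness_insert_images_into_content_py : String × (List (List (String × Int))) × List (Option String) :=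
  ("title\nbody", [[("line_index", 0)]], [some "u"])

def Spec_insert_images_into_content_py (content : String) (sections : List (List (String × Int))) (image_urls : List (Option String)) (out : String) : Prop := out = insert_images_into_content_py_alt content sections image_urls
instance (content : String) (sections : List (List (String × Int))) (image_urls : List (Option String)) (out : String) : Decidable (Spec_insert_images_into_content_py content sections image_urls out) := by unfold Spec_insert_images_into_content_py; infer_instance

-- ===== CLAIM (what is proved, stated in full; the proofs are below) =====
def Claim_equal_insert_images_into_content_py : Prop := ∀ (content : String) (sections : List (List (String × Int))) (image_urls : List (Option String)), Dom_insert_images_into_content_py content sections image_urls → Pre_insert_images_into_content_py content sections image_urls → Spec_insert_images_into_content_py content sections image_urls (insert_images_into_content_py content sections image_urls)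

-- ===== LEMMAS AND PROOFS =====

-- the witness satisfies Dom and Pre
theorem pvWitness_ok :
    Dom_insert_images_into_content_py pvWitness_insert_images_into_content_py.1 pvWitness_insert_images_into_content_py.2.1 pvWitness_insert_images_into_content_py.2.2 ∧
    Pre_insert_images_into_content_py pvWitness_insert_images_into_content_py.1 pvWitness_insert_images_into_content_py.2.1 pvWitness_insert_images_into_content_py.2.2 := by
  decide

def pvWeave : List String → Int → (Int → List String) → List String
  | [], _, _ => []
  | x :: xs, i, e => x :: e i ++ pvWeave xs (i + 1) e

theorem pvWeave_append (xs ys : List String) (i : Int) (e : Int → List String) :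
    pvWeave (xs ++ ys) i e = pvWeave xs i e ++ pvWeave ys (i + xs.length) e := by
  induction xs generalizing i with
  | nil => simp [pvWeave]
  | cons x xs ih => simp [pvWeave, ih, add_assoc]; ring_nf

theorem pvWeave_congr (xs : List String) (i : Int) (e e' : Int → List String)
    (h : ∀ j : Int, i ≤ j → j < i + xs.length → e j = e' j) :
    pvWeave xs i e = pvWeave xs i e' := by
  induction xs generalizing i with
  | nil => simp [pvWeave]
  | cons x xs ih =>
    simp only [pvWeave]
    rw [h i le_rfl (by simp only [List.length_cons]; push_cast; omega),
      ih (i+1) (fun j h1 h2 => h j (by omega)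
        (by simp only [List.length_cons] at h2 ⊢; push_cast at h2 ⊢; omega))]

theorem pvWeave_nil_extras (xs : List String) (i : Int) (e : Int → List String)
    (h : ∀ j : Int, i ≤ j → j < i + xs.length → e j = []) :
    pvWeave xs i e = xs := by
  induction xs generalizing i with
  | nil => simp [pvWeave]
  | cons x xs ih =>
    simp only [pvWeave]
    rw [h i le_rfl (by simp only [List.length_cons]; push_cast; omega),
      ih (i+1) (fun j h1 h2 => h j (by omega)
        (by simp only [List.length_cons] at h2 ⊢; push_cast at h2 ⊢; omega))]
    simp

theorem pvWeave_last_append (xs : List String) (i : Int) (e e' : Int → List String) (t : List String)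
    (hne : xs ≠ [])
    (hagree : ∀ j : Int, i ≤ j → j < i + xs.length - 1 → e' j = e j)
    (hlast : e' (i + xs.length - 1) = e (i + xs.length - 1) ++ t) :
    pvWeave xs i e' = pvWeave xs i e ++ t := by
  induction xs generalizing i with
  | nil => simp at hne
  | cons x xs ih =>
    cases xs with
    | nil =>
      simp only [pvWeave]
      simp at hlast
      simp [hlast]
    | cons y ys =>
      have h1 : pvWeave (x :: y :: ys) i e' = x :: e' i ++ pvWeave (y :: ys) (i + 1) e' := rfl
      have h2 : pvWeave (x :: y :: ys) i e = x :: e i ++ pvWeave (y :: ys) (i + 1) e := rfl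
      have hsh : (i + 1) + ((y :: ys).length : Int) - 1 = i + ((x :: y :: ys).length : Int) - 1 := by
        simp only [List.length_cons]; push_cast; omega
      rw [h1, h2, hagree i le_rfl (by simp only [List.length_cons]; push_cast; omega),
        ih (i + 1) (by simp)
          (fun j hj1 hj2 => hagree j (by omega)
            (by simp only [List.length_cons] at hj2 ⊢; push_cast at hj2 ⊢; omega))
          (by rw [hsh]; exact hlast)]
      simp

-- A's per-line extras, read off the section map
def pvExtraA (m : PySem.Dict Int Int) (urls : List (Option String)) (i : Int) : List String :=
  match m.get? i with
  | some idx =>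
    match (if idx < (urls.length : Int) then (PySem.List.pyGet? urls idx).getD none else none) with
    | some u => if u == "" then [] else [pvHtml u]
    | none => []
  | none => []

theorem pvFoldl_weave (g : Int → List String) (lines : List String) (s : Int) (acc : List String) :
    (PySem.List.enumerate lines s).foldl (fun acc p => acc ++ (p.2 :: g p.1)) acc
      = acc ++ pvWeave lines s g := by
  induction lines generalizing s acc with
  | nil => simp [PySem.List.enumerate, pvWeave]
  | cons x xs ih =>
    rw [PySem.List.enumerate_cons]
    simp only [List.foldl_cons, ih, pvWeave]
    simp

-- B's insertion generator for one (line_index, section position) item of the map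
def pvG (n : Nat) (urls : List (Option String)) (q : Int × Int) : List (Int × String) :=
  if 0 ≤ q.1 ∧ q.1 < (n : Int) ∧ q.2 < (urls.length : Int) then
    match (PySem.List.pyGet? urls q.2).getD none with
    | some u => if u == "" then [] else [(q.1 + 1, pvHtml u)]
    | none => []
  else []

theorem pvSecMap_nodup (sections : List (List (String × Int))) : (pvSecMap sections).keys.Nodup := by
  unfold pvSecMap
  generalize PySem.List.enumerate sections 0 = l
  have h : ∀ (l : List (Int × List (String × Int))) (d : PySem.Dict Int Int),
      d.keys.Nodup → (l.foldl (fun d p => match pvLookup p.2 with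
        | some li => d.insert li p.1
        | none => d) d).keys.Nodup := by
    intro l
    induction l with
    | nil => intro d hd; simpa using hd
    | cons p l ih =>
      intro d hd
      simp only [List.foldl_cons]
      cases pvLookup p.2 with
      | none => exact ih d hd
      | some li => exact ih _ (PySem.Dict.nodup_keys_insert d li p.1 hd)
  exact h l _ (by simp [PySem.Dict.keys_empty])

theorem pvG_mem (n : Nat) (urls : List (Option String)) (q : Int × Int) (r : Int × String)
    (hr : r ∈ pvG n urls q) : r.1 = q.1 + 1 ∧ 0 ≤ q.1 ∧ q.1 < (n : Int) := by
  unfold pvG at hr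
  split at hr
  · rename_i hc
    split at hr
    · split at hr
      · simp at hr
      · simp at hr
        refine ⟨by rw [hr], hc.1, hc.2.1⟩
    · simp at hr
  · simp at hr

theorem pvG_len (n : Nat) (urls : List (Option String)) (q : Int × Int) :
    (pvG n urls q).length ≤ 1 := by
  unfold pvG
  split
  · split
    · split <;> simp
    · simp
  · simp

theorem pvFlatMap_pick {ν : Type} (l : List (Int × ν)) (f : Int × ν → List (Int × String)) (i : Int) (v : ν)
    (hnd : (l.map Prod.fst).Nodup) (hmem : (i, v) ∈ l) :
    l.flatMap (fun q => if q.1 = i then f q else []) = f (i, v) := by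
  induction l with
  | nil => simp at hmem
  | cons q l ih =>
    simp only [List.map_cons, List.nodup_cons] at hnd
    rcases List.mem_cons.mp hmem with h1 | h1
    · subst h1
      have h2 : List.flatMap (fun q => if q.1 = i then f q else []) l = [] := by
        rw [List.flatMap_eq_nil_iff]
        intro x hx
        have hne : x.1 ≠ i := fun hc => hnd.1 (hc ▸ List.mem_map.mpr ⟨x, hx, rfl⟩)
        rw [if_neg hne]
      simp [List.flatMap_cons, h2]
    · have hne : q.1 ≠ i := by
        intro hc
        apply hnd.1
        rw [hc]
        exact List.mem_map_of_mem h1 (f := Prod.fst)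
      simp only [List.flatMap_cons, if_neg hne, List.nil_append]
      exact ih hnd.2 h1

theorem pvIns_filter_gen (l : List (Int × Int)) (n : Nat) (urls : List (Option String))
    (get? : Int → Option Int) (i : Int)
    (hnd : (l.map Prod.fst).Nodup)
    (hsome : ∀ idx, get? i = some idx → (i, idx) ∈ l)
    (hnone : get? i = none → ∀ q ∈ l, q.1 ≠ i) :
    (l.flatMap (pvG n urls)).filter (fun r => r.1 == i + 1)
      = (match get? i with
         | some idx => pvG n urls (i, idx)
         | none => []) := by
  rw [List.filter_flatMap]
  have hcong : l.flatMap (fun q => (pvG n urls q).filter (fun r => r.1 == i + 1))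
      = l.flatMap (fun q => if q.1 = i then pvG n urls q else []) := by
    apply List.flatMap_congr
    intro q _
    by_cases hqi : q.1 = i
    · rw [if_pos hqi, List.filter_eq_self.mpr]
      intro r hr
      have := (pvG_mem n urls q r hr).1
      simp only [beq_iff_eq]; omega
    · rw [if_neg hqi, List.filter_eq_nil_iff.mpr]
      intro r hr
      have := (pvG_mem n urls q r hr).1
      simp only [beq_iff_eq]; omega
  rw [hcong]
  cases hget : get? i with
  | some idx => exact pvFlatMap_pick l (pvG n urls) i idx hnd (hsome idx hget)
  | none =>
    rw [List.flatMap_eq_nil_iff]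
    intro x hx
    rw [if_neg (hnone hget x hx)]

theorem pvIns_nodup (l : List (Int × Int)) (n : Nat) (urls : List (Option String))
    (hnd : (l.map Prod.fst).Nodup) :
    ((l.flatMap (pvG n urls)).map Prod.fst).Nodup := by
  induction l with
  | nil => simp
  | cons q l ih =>
    simp only [List.map_cons, List.nodup_cons] at hnd
    simp only [List.flatMap_cons, List.map_append, List.nodup_append]
    refine ⟨?_, ih hnd.2, ?_⟩
    · have := pvG_len n urls q
      cases hG : pvG n urls q with
      | nil => simp
      | cons r rs =>
        rw [hG] at this
        simp at this
        rw [this]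
        simp
    · intro a ha b hb
      obtain ⟨r, hr1, hr2⟩ := List.mem_map.mp ha
      obtain ⟨r', hr'1, hr'2⟩ := List.mem_map.mp hb
      obtain ⟨q', hq'1, hq'2⟩ := List.mem_flatMap.mp hr'1
      have h1 := (pvG_mem n urls q r hr1).1
      have h2 := (pvG_mem n urls q' r' hq'2).1
      intro hc
      apply hnd.1
      have : q.1 = q'.1 := by rw [← hr2, ← hr'2] at hc; omega
      rw [this]
      exact List.mem_map.mpr ⟨q', hq'1, rfl⟩

theorem pvFilter_len_le_one (ins : List (Int × String)) (k : Int)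
    (hnd : (ins.map Prod.fst).Nodup) :
    (ins.filter (fun r => r.1 == k)).length ≤ 1 := by
  induction ins with
  | nil => simp
  | cons q l ih =>
    simp only [List.map_cons, List.nodup_cons] at hnd
    by_cases hq : q.1 = k
    · rw [List.filter_cons_of_pos (by simp [hq])]
      have : l.filter (fun r => r.1 == k) = [] := by
        rw [List.filter_eq_nil_iff]
        intro r hr hc
        simp at hc
        exact hnd.1 (by rw [hq, ← hc]; exact List.mem_map.mpr ⟨r, hr, rfl⟩)
      simp [this]
    · rw [List.filter_cons_of_neg (by simp [hq])]
      exact ih hnd.2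

theorem pvSorted_filter (ins : List (Int × String)) (k : Int)
    (hnd : (ins.map Prod.fst).Nodup) :
    (PySem.List.sorted ins (fun q => q.1) true).filter (fun r => r.1 == k)
      = ins.filter (fun r => r.1 == k) := by
  have hperm : ((PySem.List.sorted ins (fun q => q.1) true).filter (fun r => r.1 == k)).Perm
      (ins.filter (fun r => r.1 == k)) :=
    (PySem.List.sorted_perm ins (fun q => q.1) true).filter _
  have h2 := pvFilter_len_le_one ins k hnd
  have h1 : ((PySem.List.sorted ins (fun q => q.1) true).filter (fun r => r.1 == k)).length ≤ 1 :=
    hperm.length_eq ▸ h2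
  cases hA : (PySem.List.sorted ins (fun q => q.1) true).filter (fun r => r.1 == k) with
  | nil => rw [hA] at hperm; exact hperm.nil_eq
  | cons a as =>
    rw [hA] at hperm h1
    cases as with
    | nil => exact List.singleton_perm.mp hperm
    | cons b bs => simp at h1

theorem pvSorted_desc (ins : List (Int × String))
    (hnd : (ins.map Prod.fst).Nodup) :
    List.Pairwise (fun a b => b.1 < a.1) (PySem.List.sorted ins (fun q => q.1) true) := by
  have h1 := PySem.List.sorted_pairwise_rev ins (fun q => q.1)
  have h2 : ((PySem.List.sorted ins (fun q => q.1) true).map Prod.fst).Nodup :=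
    (((PySem.List.sorted_perm ins (fun q => q.1) true).map Prod.fst).nodup_iff).mpr hnd
  have h3 : List.Pairwise (fun (a b : Int × String) => a.1 ≠ b.1)
      (PySem.List.sorted ins (fun q => q.1) true) := by
    exact List.pairwise_map.mp h2
  exact (h1.and h3).imp (fun h => by omega)


theorem pvFoldl_insert_weave (ins : List (Int × String)) (lines : List String)
    (hdesc : List.Pairwise (fun a b => b.1 < a.1) ins)
    (hrange : ∀ q ∈ ins, 1 ≤ q.1 ∧ q.1 ≤ (lines.length : Int)) :
    ins.foldl (fun ls q => PySem.List.insert ls q.1 q.2) lines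
      = pvWeave lines 0 (fun i => (ins.filter (fun q => q.1 == i + 1)).map (·.2)) := by
  induction ins generalizing lines with
  | nil =>
    simp only [List.foldl_nil]
    exact (pvWeave_nil_extras lines 0 _ (fun j _ _ => by simp)).symm
  | cons q rest ih =>
    obtain ⟨pos, h⟩ := q
    simp only [List.foldl_cons]
    have hq := hrange (pos, h) (List.mem_cons_self ..)
    simp only at hq
    -- pos = p as Nat, 1 ≤ p ≤ lines.length
    obtain ⟨p, rfl⟩ : ∃ p : Nat, pos = (p : Int) := ⟨pos.toNat, (Int.toNat_of_nonneg (by omega)).symm⟩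
    have hp1 : 1 ≤ p := by exact_mod_cast hq.1
    have hpl : p ≤ lines.length := by exact_mod_cast hq.2
    rw [PySem.List.insert_natCast lines p h hpl]
    have hrest_lt : ∀ r ∈ rest, r.1 < (p : Int) := by
      intro r hr
      exact (List.pairwise_cons.mp hdesc).1 r hr
    have hlen' : (lines.take p ++ h :: lines.drop p).length = lines.length + 1 := by
      simp
    rw [ih (lines.take p ++ h :: lines.drop p) (List.pairwise_cons.mp hdesc).2
      (fun r hr => ⟨(hrange r (List.mem_cons_of_mem _ hr)).1, by
        have := (hrange r (List.mem_cons_of_mem _ hr)).2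
        rw [hlen']; push_cast; omega⟩)]
    -- now both sides are weaves; split lines at p
    have htake : (lines.take p).length = p := List.length_take_of_le hpl
    -- LHS
    rw [show lines.take p ++ h :: lines.drop p = lines.take p ++ ([h] ++ lines.drop p) by simp,
      pvWeave_append, pvWeave_append]
    conv_rhs => rw [show lines = lines.take p ++ lines.drop p from (List.take_append_drop p lines).symm,
      pvWeave_append]
    rw [htake]
    -- middle singleton weave
    have hmid : pvWeave [h] ((0:Int) + p) (fun i => ((rest.filter (fun q => q.1 == i + 1)).map (·.2)))
        = [h] := by
      apply pvWeave_nil_extras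
      intro j hj1 hj2
      simp only [List.length_cons, List.length_nil] at hj2
      have : j = (p:Int) := by push_cast at hj1 hj2 ⊢; omega
      subst this
      rw [List.filter_eq_nil_iff.mpr, List.map_nil]
      intro r hr
      have := hrest_lt r hr
      simp only [beq_iff_eq]; omega
    -- drop-part weaves are trivial
    have hdropL : pvWeave (lines.drop p) ((0:Int) + p + ([h]:List String).length)
        (fun i => ((rest.filter (fun q => q.1 == i + 1)).map (·.2))) = lines.drop p := by
      apply pvWeave_nil_extras
      intro j hj1 hj2
      simp only [List.length_cons, List.length_nil] at hj1
      rw [List.filter_eq_nil_iff.mpr, List.map_nil]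
      intro r hr
      have := hrest_lt r hr
      simp only [beq_iff_eq]
      push_cast at hj1
      omega
    have hdropR : pvWeave (lines.drop p) ((0:Int) + p)
        (fun i => ((((p:Int), h) :: rest).filter (fun q => q.1 == i + 1)).map (·.2)) = lines.drop p := by
      apply pvWeave_nil_extras
      intro j hj1 hj2
      rw [List.filter_eq_nil_iff.mpr, List.map_nil]
      intro r hr
      rcases List.mem_cons.mp hr with h1 | h1
      · subst h1; simp only [beq_iff_eq]; omega
      · have := hrest_lt r h1
        simp only [beq_iff_eq]; omega
    -- take-part: RHS take-part = LHS take-part ++ [h]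
    have htakeEq : pvWeave (lines.take p) 0
        (fun i => ((((p:Int), h) :: rest).filter (fun q => q.1 == i + 1)).map (·.2))
        = pvWeave (lines.take p) 0
            (fun i => ((rest.filter (fun q => q.1 == i + 1)).map (·.2))) ++ [h] := by
      apply pvWeave_last_append
      · intro hc; rw [hc] at htake; simp at htake; omega
      · intro j hj1 hj2
        rw [htake] at hj2
        simp only [List.filter_cons]
        rw [if_neg]
        simp only [beq_iff_eq]; omega
      · rw [htake]
        have hjp : (0:Int) + (p:Int) - 1 + 1 = (p:Int) := by omega
        simp only [List.filter_cons, hjp]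
        rw [if_pos (by simp), List.map_cons]
        rw [List.filter_eq_nil_iff.mpr, List.map_nil]
        · simp
        · intro r hr
          have := hrest_lt r hr
          simp only [beq_iff_eq]; omega
    rw [hmid, hdropL, hdropR, htakeEq]
    simp

-- the two else-branches agree, for any line list and any section map with distinct keys
theorem pvKey (lines : List String) (m : PySem.Dict Int Int) (image_urls : List (Option String))
    (hnd : m.keys.Nodup) :
    PySem.Str.join "\n" ((PySem.List.enumerate lines 0).foldl
      (fun acc p =>
        let acc2 := acc ++ [p.2]
        match m.get? p.1 with
        | some idx =>
          let url : Option String :=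
            if idx < (image_urls.length : Int) then (PySem.List.pyGet? image_urls idx).getD none else none
          match url with
          | some u => if u == "" then acc2 else acc2 ++ [pvHtml u]
          | none => acc2
        | none => acc2)
      [])
    = PySem.Str.join "\n" ((PySem.List.sorted
        (m.items.foldl
          (fun (acc : List (Int × String)) (q : Int × Int) =>
            if 0 ≤ q.1 ∧ q.1 < (lines.length : Int) ∧ q.2 < (image_urls.length : Int) then
              match (PySem.List.pyGet? image_urls q.2).getD none with
              | some u => if u == "" then acc else acc ++ [(q.1 + 1, pvHtml u)]
              | none => acc
            else acc)
          ([] : List (Int × String)))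
        (fun q : Int × String => q.1) true).foldl
        (fun ls (q : Int × String) => PySem.List.insert ls q.1 q.2) lines) := by
  congr 1
  -- A's loop is a weave
  have hA : (PySem.List.enumerate lines 0).foldl
      (fun acc p =>
        let acc2 := acc ++ [p.2]
        match m.get? p.1 with
        | some idx =>
          let url : Option String :=
            if idx < (image_urls.length : Int) then (PySem.List.pyGet? image_urls idx).getD none else none
          match url with
          | some u => if u == "" then acc2 else acc2 ++ [pvHtml u]
          | none => acc2
        | none => acc2)
      ([] : List String)
      = pvWeave lines 0 (pvExtraA m image_urls) := by
    have hstep : (fun (acc : List String) (p : Int × String) =>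
        let acc2 := acc ++ [p.2]
        match m.get? p.1 with
        | some idx =>
          let url : Option String :=
            if idx < (image_urls.length : Int) then (PySem.List.pyGet? image_urls idx).getD none else none
          match url with
          | some u => if u == "" then acc2 else acc2 ++ [pvHtml u]
          | none => acc2
        | none => acc2)
        = fun acc p => acc ++ (p.2 :: pvExtraA m image_urls p.1) := by
      funext acc p
      simp only [pvExtraA]
      cases m.get? p.1 with
      | none => simp
      | some idx =>
        cases h2 : (if idx < ((image_urls.length : Nat) : Int)
            then (PySem.List.pyGet? image_urls idx).getD none else none) with
        | none => simp [h2]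
        | some u => by_cases hu : u == "" <;> simp [h2, hu]
    rw [hstep, pvFoldl_weave]
    simp
  -- B's insertion loop is a flatMap
  have hB : m.items.foldl
      (fun acc q =>
        if 0 ≤ q.1 ∧ q.1 < (lines.length : Int) ∧ q.2 < (image_urls.length : Int) then
          match (PySem.List.pyGet? image_urls q.2).getD none with
          | some u => if u == "" then acc else acc ++ [(q.1 + 1, pvHtml u)]
          | none => acc
        else acc)
      ([] : List (Int × String))
      = m.items.flatMap (pvG lines.length image_urls) := by
    have hstep : (fun (acc : List (Int × String)) (q : Int × Int) =>
        if 0 ≤ q.1 ∧ q.1 < (lines.length : Int) ∧ q.2 < (image_urls.length : Int) then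
          match (PySem.List.pyGet? image_urls q.2).getD none with
          | some u => if u == "" then acc else acc ++ [(q.1 + 1, pvHtml u)]
          | none => acc
        else acc)
        = fun acc q => acc ++ pvG lines.length image_urls q := by
      funext acc q
      simp only [pvG]
      split
      · cases h2 : (PySem.List.pyGet? image_urls q.2).getD none with
        | none => simp
        | some u => by_cases hu : u == "" <;> simp [hu]
      · simp
    rw [hstep, PySem.List.foldl_append_eq_flatMap]
    simp
  rw [hA, hB]
  have hndi : ((m.items.flatMap (pvG lines.length image_urls)).map Prod.fst).Nodup :=
    pvIns_nodup m.items lines.length image_urls hnd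
  have hrange : ∀ q ∈ PySem.List.sorted (m.items.flatMap (pvG lines.length image_urls))
      (fun q => q.1) true, 1 ≤ q.1 ∧ q.1 ≤ (lines.length : Int) := by
    intro q hq
    rw [PySem.List.mem_sorted] at hq
    obtain ⟨q', hq'1, hq'2⟩ := List.mem_flatMap.mp hq
    have := pvG_mem lines.length image_urls q' q hq'2
    omega
  rw [pvFoldl_insert_weave _ lines (pvSorted_desc _ hndi) hrange]
  have hfe : (fun i => ((PySem.List.sorted (m.items.flatMap (pvG lines.length image_urls))
        (fun q => q.1) true).filter (fun q => q.1 == i + 1)).map (·.2))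
      = fun i => ((m.items.flatMap (pvG lines.length image_urls)).filter
          (fun q => q.1 == i + 1)).map (·.2) := by
    funext i
    rw [pvSorted_filter _ (i + 1) hndi]
  rw [hfe]
  apply pvWeave_congr
  intro j hj1 hj2
  rw [pvIns_filter_gen m.items lines.length image_urls m.get? j hnd
    (fun idx h => PySem.Dict.mem_items_of_get?_eq_some m h)
    (fun hget q hq hc => ((PySem.Dict.get?_eq_none_iff_not_mem_keys m j).mp hget)
      (by rw [← hc]; exact List.mem_map.mpr ⟨q, hq, rfl⟩))]
  cases hget : m.get? j with
  | none => simp [pvExtraA, hget]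
  | some idx =>
    simp only [pvExtraA, hget]
    by_cases hidx : idx < (image_urls.length : Int)
    · rw [if_pos hidx]
      unfold pvG
      rw [if_pos ⟨hj1, by simpa using hj2, hidx⟩]
      cases h2 : (PySem.List.pyGet? image_urls idx).getD none with
      | none => simp
      | some u => by_cases hu : u == "" <;> simp [hu]
    · rw [if_neg hidx]
      unfold pvG
      rw [if_neg (by intro h; exact hidx h.2.2)]
      simp

-- ===== VERDICT (by name: the statement is the Claim_ definition above) =====
theorem insert_images_into_content_py_spec : Claim_equal_insert_images_into_content_py := by
  unfold Claim_equal_insert_images_into_content_py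
  intro content sections image_urls _ _
  unfold Spec_insert_images_into_content_py
  unfold insert_images_into_content_py insert_images_into_content_py_alt
  by_cases hg : sections = [] ∨ image_urls.any pvTruthy = false
  · rw [if_pos hg, if_pos hg]
  · rw [if_neg hg, if_neg hg]
    exact pvKey ((PySem.Str.split? content "\n").getD []) (pvSecMap sections) image_urls
      (pvSecMap_nodup sections)
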